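-- pv_equiv track=rewrite | github.com/netra-systems/zen | scripts/analyze_test_mocks.py | find_mock_justification
-- ===== SOURCE A (Python) =====
-- def find_mock_justification(content: str, line_no: int) -> bool:
--     """Check if mock has a justification comment or decorator."""
--     lines = content.split('\n')
--
--     # Check surrounding lines for justification
--     start = max(0, line_no - 5)
--     end = min(len(lines), line_no + 2)
--
--     for i in range(start, end):
--         if i < len(lines):
--             line = lines[i]
--             if '@mock_justified' in line or '# Mock justified' in line or '# Justified:' in line:
--                 return True
--
--     return False
-- ===== SOURCE B (Python) =====
-- def find_mock_justification(content: str, line_no: int) -> bool: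
--     """Check if mock has a justification comment or decorator."""
--     markers = ('@mock_justified', '# Mock justified', '# Justified:')
--     line = 0  # line index of position p during one sweep over the raw string
--     for p in range(len(content)):
--         if line_no - 5 <= line < line_no + 2 and content.startswith(markers, p):
--             return True
--         if content[p] == '\n':
--             line += 1
--     return False
-- ===== Notes on version B (the rewrite author's own statement) =====
-- stated objective: alternative
-- what changed: Instead of splitting the content into a line list and indexing a clamped window of it, B makes one character-level sweep over the raw string, maintaining a running line counter and testing marker occurrences positionally with startswith(markers, p); it never builds a line list, never clamps, and never indexes lines.
import Mathlib
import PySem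

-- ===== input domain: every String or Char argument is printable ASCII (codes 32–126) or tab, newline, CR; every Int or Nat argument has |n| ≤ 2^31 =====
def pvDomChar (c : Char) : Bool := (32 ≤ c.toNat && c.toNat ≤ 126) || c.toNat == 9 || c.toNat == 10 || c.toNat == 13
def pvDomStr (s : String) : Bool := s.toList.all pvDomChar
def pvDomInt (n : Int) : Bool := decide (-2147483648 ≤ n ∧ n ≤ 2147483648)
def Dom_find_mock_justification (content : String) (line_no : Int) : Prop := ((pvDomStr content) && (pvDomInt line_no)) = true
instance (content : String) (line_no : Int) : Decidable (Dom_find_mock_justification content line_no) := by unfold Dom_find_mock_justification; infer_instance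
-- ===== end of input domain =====

-- B replaces A's split-into-lines-and-index-a-window algorithm by one character-level
-- sweep over the raw string that keeps a running line counter and tests marker
-- occurrences positionally (objective: alternative).

-- ===== PORT A =====
-- content.split('\n') has a nonempty separator, so Python never raises: split? is `some`, getD [] is exact.
def find_mock_justification (content : String) (line_no : Int) : Bool :=
  let lines : List String := (PySem.Str.split? content "\n").getD []
  let start : Int := max 0 (line_no - 5)
  let stop : Int := min (PySem.List.len lines) (line_no + 2)
  (PySem.List.pyRange start stop 1).any (fun i =>
    if i < PySem.List.len lines then
      let line := PySem.List.pyGetD lines i ""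
      PySem.Str.isIn "@mock_justified" line || PySem.Str.isIn "# Mock justified" line ||
        PySem.Str.isIn "# Justified:" line
    else false)

-- ===== PORT B =====
def pvMarkers : List String := ["@mock_justified", "# Mock justified", "# Justified:"]

-- the `for p in range(len(content))` loop: the remaining suffix IS content[p:],
-- so content.startswith(m, p) is Chars.startswith on the suffix (exact for 0 ≤ p < len)
def pvSweep (line_no : Int) (line : Int) : List Char → Bool
  | [] => false
  | ch :: rest =>
    if (decide (line_no - 5 ≤ line) && decide (line < line_no + 2)) &&
        pvMarkers.any (fun m => PySem.Chars.startswith (ch :: rest) m.toList) then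
      true
    else
      pvSweep line_no (if ch = '\n' then line + 1 else line) rest

def find_mock_justification_alt (content : String) (line_no : Int) : Bool :=
  pvSweep line_no 0 content.toList

-- ===== PRECONDITION & SPEC =====
def Spec_find_mock_justification (content : String) (line_no : Int) (out : Bool) : Prop := out = find_mock_justification_alt content line_no
instance (content : String) (line_no : Int) (out : Bool) : Decidable (Spec_find_mock_justification content line_no out) := by unfold Spec_find_mock_justification; infer_instance

-- ===== CLAIM (what is proved, stated in full; the proofs are below) =====
def Claim_equal_find_mock_justification : Prop := ∀ (content : String) (line_no : Int), Dom_find_mock_justification content line_no → Spec_find_mock_justification content line_no (find_mock_justification content line_no)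

-- ===== LEMMAS AND PROOFS =====

-- proof-side model of str.split('\n') as a structural recursion
def pvSplit (c : Char) : List Char → List (List Char)
  | [] => [[]]
  | ch :: rest => if ch = c then [] :: pvSplit c rest else (pvSplit c rest).modifyHead (ch :: ·)

lemma pv_modifyHead_id {α : Type} (l : List α) : l.modifyHead (fun x => x) = l := by
  cases l <;> simp

lemma pvSplit_ne_nil (c : Char) (cs : List Char) : pvSplit c cs ≠ [] := by
  cases cs with
  | nil => simp [pvSplit]
  | cons ch rest =>
    simp only [pvSplit]
    split_ifs
    · simp
    · cases h : pvSplit c rest with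
      | nil => exact absurd h (pvSplit_ne_nil c rest)
      | cons p ps => simp

-- PySem's splitOn with a one-char separator is pvSplit
lemma pvSplitOn_go_eq (c : Char) : ∀ (fuel : Nat) (l cur : List Char) (acc : List (List Char)),
    l.length ≤ fuel →
    PySem.Chars.splitOn.go [c] fuel l cur acc = acc.reverse ++ (pvSplit c l).modifyHead (cur.reverse ++ ·) := by
  intro fuel
  induction fuel with
  | zero =>
    intro l cur acc hl
    have : l = [] := List.length_eq_zero_iff.mp (Nat.le_zero.mp hl)
    subst this
    simp [PySem.Chars.splitOn.go, pvSplit]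
  | succ fuel ih =>
    intro l cur acc hl
    cases l with
    | nil => simp [PySem.Chars.splitOn.go, pvSplit]
    | cons ch rest =>
      by_cases hch : ch = c
      · subst hch
        have hpre : ([ch].isPrefixOf (ch :: rest)) = true := by simp [List.isPrefixOf]
        rw [PySem.Chars.splitOn.go]
        simp only [hpre, if_true, List.length_cons, List.length_nil, List.drop_succ_cons,
          List.drop_zero]
        rw [ih rest [] (cur.reverse :: acc) (by simpa using hl)]
        simp [pvSplit, pv_modifyHead_id]
      · have hpre : ([c].isPrefixOf (ch :: rest)) = false := by
          simp [List.isPrefixOf]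
          intro h; exact absurd h.symm hch
        rw [PySem.Chars.splitOn.go]
        simp only [hpre]
        rw [if_neg (by simp)]
        rw [ih rest (ch :: cur) acc (by simpa using hl)]
        simp only [pvSplit, if_neg hch, List.modifyHead_modifyHead]
        congr 2
        funext x
        simp


lemma pvSplitOn_eq (c : Char) (cs : List Char) : PySem.Chars.splitOn cs [c] = pvSplit c cs := by
  rw [PySem.Chars.splitOn, pvSplitOn_go_eq c (cs.length + 1) cs [] [] (by omega)]
  simp [pv_modifyHead_id]

-- A prefix avoiding c of a list with c in the middle stays inside the part before c.
lemma pv_prefix_sep {α : Type} {c : α} (sub : List α) (hc : c ∉ sub) :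
    ∀ (a b : List α), sub <+: a ++ c :: b → sub <+: a := by
  induction sub with
  | nil => intro a b _; exact List.nil_prefix
  | cons s sub' ih =>
    intro a b h
    cases a with
    | nil =>
      exfalso
      rcases List.cons_prefix_cons.mp h with ⟨hs, _⟩
      exact hc (by simp [hs])
    | cons x a' =>
      rcases List.cons_prefix_cons.mp h with ⟨hs, h'⟩
      exact List.cons_prefix_cons.mpr ⟨hs, ih (fun hm => hc (List.mem_cons_of_mem _ hm)) a' b h'⟩

-- the first piece of pvSplit is an initial segment of cs, cut at the first c (if any)
lemma pvSplit_head_rest (c : Char) (cs : List Char) :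
    cs = (pvSplit c cs).headI ∨ ∃ ys, cs = (pvSplit c cs).headI ++ c :: ys := by
  induction cs with
  | nil => left; simp [pvSplit]
  | cons ch rest ih =>
    by_cases hch : ch = c
    · subst hch
      right
      exact ⟨rest, by simp [pvSplit]⟩
    · cases hS : pvSplit c rest with
      | nil => exact absurd hS (pvSplit_ne_nil c rest)
      | cons p ps =>
        rw [hS] at ih
        simp only [pvSplit, if_neg hch, hS, List.modifyHead, List.headI]
        rcases ih with h | ⟨ys, h⟩
        · left; simp [List.headI] at h; simp [h]
        · right; exact ⟨ys, by simp [List.headI] at h; simp [h]⟩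

-- a nonempty c-free pattern starts at some position whose prefix holds k copies of c
-- iff it is an infix of the k-th piece of pvSplit
lemma pv_exists_nat {Q : Nat → Prop} : (∃ p : Nat, Q p) ↔ Q 0 ∨ ∃ q : Nat, Q (q + 1) := by
  constructor
  · rintro ⟨(_ | q), h⟩
    · exact Or.inl h
    · exact Or.inr ⟨q, h⟩
  · rintro (h | ⟨q, h⟩)
    · exact ⟨0, h⟩
    · exact ⟨q + 1, h⟩

lemma pv_not_prefix_cons_self {c : Char} {m : List Char} (hne : m ≠ []) (hc : c ∉ m)
    (l : List Char) : ¬ m <+: c :: l := by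
  cases m with
  | nil => exact absurd rfl hne
  | cons x m' =>
    intro h
    rcases List.cons_prefix_cons.mp h with ⟨hx, _⟩
    exact hc (by simp [hx])

lemma pv_occ_iff {c : Char} {m : List Char} (hne : m ≠ []) (hc : c ∉ m) :
    ∀ (cs : List Char) (P : Nat → Prop),
      (∃ p : Nat, m <+: cs.drop p ∧ P ((cs.take p).count c)) ↔
      (∃ i : Nat, m <:+: (pvSplit c cs).getD i [] ∧ P i) := by
  intro cs
  induction cs with
  | nil =>
    intro P
    constructor
    · rintro ⟨p, h1, _⟩
      simp only [List.drop_nil] at h1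
      exact absurd (List.prefix_nil.mp h1) hne
    · rintro ⟨i, h1, _⟩
      cases i <;> simp [pvSplit, List.getD] at h1 <;> exact absurd h1 hne
  | cons ch rest ih =>
    intro P
    refine Iff.trans pv_exists_nat (Iff.trans ?_ pv_exists_nat.symm)
    simp only [List.drop_succ_cons, List.take_succ_cons, List.take_zero, List.count_nil,
      List.count_cons, List.drop_zero]
    by_cases hch : ch = c
    · subst hch
      have h0 : ¬ m <+: ch :: rest := pv_not_prefix_cons_self hne hc rest
      constructor
      · rintro (⟨h, _⟩ | ⟨q, hq, hP⟩)
        · exact absurd h h0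
        · rcases (ih (fun i => P (i + 1))).mp ⟨q, hq, by simpa using hP⟩ with ⟨i, hi, hPi⟩
          exact Or.inr ⟨i, by simpa [pvSplit, List.getD] using hi, hPi⟩
      · rintro (⟨h, _⟩ | ⟨j, hj, hP⟩)
        · simp [pvSplit, List.getD] at h
          exact absurd h hne
        · rcases (ih (fun i => P (i + 1))).mpr
              ⟨j, by simpa [pvSplit, List.getD] using hj, hP⟩
            with ⟨q, hq, hPq⟩
          exact Or.inr ⟨q, hq, by simpa using hPq⟩
    · cases hS : pvSplit c rest with
      | nil => exact absurd hS (pvSplit_ne_nil c rest)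
      | cons p0 ps =>
        have hhead : rest = p0 ∨ ∃ ys, rest = p0 ++ c :: ys := by
          have := pvSplit_head_rest c rest
          rw [hS] at this
          simpa using this
        have hkey : m <+: ch :: rest ↔ m <+: ch :: p0 := by
          rcases hhead with h | ⟨ys, h⟩
          · rw [h]
          · subst h
            constructor
            · intro hp
              exact pv_prefix_sep m hc (ch :: p0) ys (by simpa using hp)
            · intro hp
              have : (ch :: p0) <+: ch :: (p0 ++ c :: ys) := by
                simp
              exact hp.trans this
        have hsplit : pvSplit c (ch :: rest) = (ch :: p0) :: ps := by
          simp [pvSplit, hch, hS]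
        have hmid := (ih P).symm
        rw [pv_exists_nat] at hmid
        simp only [hS] at hmid
        constructor
        · rintro (⟨h, hP⟩ | ⟨q, hq, hP⟩)
          · rw [hkey] at h
            exact Or.inl ⟨by
              simpa [hsplit, List.getD] using List.infix_cons_iff.mpr (Or.inl h), hP⟩
          · rcases hmid.mpr ⟨q, hq, by simpa [hch] using hP⟩ with ⟨h0, hP0⟩ | ⟨j, hj, hPj⟩
            · refine Or.inl ⟨?_, hP0⟩
              simp only [List.getD] at h0
              simpa [hsplit, List.getD] using
                List.infix_cons_iff.mpr (Or.inr (by simpa using h0))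
            · exact Or.inr ⟨j, by simpa [hsplit, List.getD] using hj, hPj⟩
        · rintro (⟨h, hP⟩ | ⟨j, hj, hP⟩)
          · have h' : m <:+: ch :: p0 := by simpa [hsplit, List.getD] using h
            rcases List.infix_cons_iff.mp h' with h'' | h''
            · exact Or.inl ⟨hkey.mpr h'', hP⟩
            · rcases hmid.mp (Or.inl ⟨by simpa [List.getD] using h'', hP⟩) with ⟨p, hp, hPp⟩
              exact Or.inr ⟨p, hp, by simpa [hch] using hPp⟩
          · rcases hmid.mp (Or.inr ⟨j, by simpa [hsplit, List.getD] using hj, hP⟩) with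
              ⟨p, hp, hPp⟩
            exact Or.inr ⟨p, hp, by simpa [hch] using hPp⟩

lemma pv_markers_ok : ∀ m ∈ pvMarkers, '\n' ∉ m.toList ∧ m.toList ≠ [] := by decide

lemma pv_cnt_succ (ch : Char) (rest : List Char) (p : Nat) :
    ((((ch :: rest).take (p+1)).count '\n' : Nat) : Int)
      = (((rest.take p).count '\n' : Nat) : Int) + (if ch = '\n' then 1 else 0) := by
  simp only [List.take_succ_cons, List.count_cons]
  split_ifs <;> simp <;> simp_all

-- characterisation of B's sweep
lemma pvSweep_iff (n : Int) : ∀ (cs : List Char) (line0 : Int),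
    pvSweep n line0 cs = true ↔
    ∃ p : Nat, (n - 5 ≤ line0 + ((cs.take p).count '\n' : Int) ∧
                line0 + ((cs.take p).count '\n' : Int) < n + 2) ∧
               ∃ m ∈ pvMarkers, m.toList <+: cs.drop p := by
  intro cs
  induction cs with
  | nil =>
    intro line0
    apply iff_of_false (by simp [pvSweep])
    rintro ⟨p, _, m, hm, hpre⟩
    simp only [List.drop_nil] at hpre
    exact (pv_markers_ok m hm).2 (List.prefix_nil.mp hpre)
  | cons ch rest ih =>
    intro line0
    by_cases hC : ((decide (n - 5 ≤ line0) && decide (line0 < n + 2)) &&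
        pvMarkers.any (fun m => PySem.Chars.startswith (ch :: rest) m.toList)) = true
    · rw [show pvSweep n line0 (ch :: rest) = true from by
        simp only [pvSweep]; rw [if_pos hC]]
      apply iff_of_true rfl
      simp only [Bool.and_eq_true, decide_eq_true_eq, List.any_eq_true] at hC
      obtain ⟨⟨h1, h2⟩, m, hm, hsw⟩ := hC
      refine ⟨0, by simp only [List.take_zero, List.count_nil, Nat.cast_zero, add_zero]; exact ⟨h1, h2⟩, m, hm, ?_⟩
      simpa using (PySem.Chars.startswith_iff _ _).mp hsw
    · rw [show pvSweep n line0 (ch :: rest)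
          = pvSweep n (if ch = '\n' then line0 + 1 else line0) rest from by
        simp only [pvSweep]; rw [if_neg hC]]
      rw [ih _]
      constructor
      · rintro ⟨p, hw, hrest⟩
        refine ⟨p + 1, ?_, by simpa using hrest⟩
        have hcnt := pv_cnt_succ ch rest p
        by_cases hch : ch = '\n' <;> simp only [hch, if_pos, if_false] at hw hcnt ⊢ <;>
          simp only [hcnt] <;> omega
      · rintro ⟨p, hw, m, hm, hpre⟩
        cases p with
        | zero =>
          exfalso
          apply hC
          simp only [List.take_zero, List.count_nil, Nat.cast_zero, add_zero] at hw
          simp only [Bool.and_eq_true, decide_eq_true_eq, List.any_eq_true]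
          exact ⟨⟨hw.1, hw.2⟩, m, hm,
            (PySem.Chars.startswith_iff _ _).mpr (by simpa using hpre)⟩
        | succ q =>
          refine ⟨q, ?_, m, hm, by simpa using hpre⟩
          have hcnt := pv_cnt_succ ch rest q
          by_cases hch : ch = '\n' <;> simp only [hch, if_pos, if_false] at hw hcnt ⊢ <;>
            simp only [hcnt] at hw <;> omega

lemma pv_lines_eq (content : String) :
    (PySem.Str.split? content "\n").getD []
      = (pvSplit '\n' content.toList).map String.ofList := by
  simp [PySem.Str.split?, PySem.Chars.split?, pvSplitOn_eq]

-- characterisation of A's window scan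
lemma pvA_iff (content : String) (n : Int) :
    find_mock_justification content n = true ↔
    ∃ m ∈ pvMarkers, ∃ i : Nat,
      (n - 5 ≤ (i : Int) ∧ (i : Int) < n + 2) ∧
      m.toList <:+: (pvSplit '\n' content.toList).getD i [] := by
  simp only [find_mock_justification, pv_lines_eq]
  rw [List.any_eq_true]
  have hlen : ((pvSplit '\n' content.toList).map String.ofList).length
      = (pvSplit '\n' content.toList).length := by simp
  constructor
  · rintro ⟨i, hi, hf⟩
    rw [PySem.List.mem_pyRange_one] at hi
    have h0 : 0 ≤ i := le_trans (le_max_left 0 _) hi.1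
    have hlt : i < PySem.List.len ((pvSplit '\n' content.toList).map String.ofList) := by
      exact lt_of_lt_of_le hi.2 (min_le_left _ _)
    rw [if_pos hlt] at hf
    rw [PySem.List.len_eq] at hlt
    have hi' : i = ((i.toNat : Nat) : Int) := by omega
    rw [hi', PySem.List.pyGetD_natCast] at hf
    have hgd : (String.ofList ([] : List Char)) = "" := rfl
    rw [← hgd, List.getD_map _ _ String.ofList] at hf
    have hwin : n - 5 ≤ (i.toNat : Int) ∧ (i.toNat : Int) < n + 2 := by
      rw [PySem.List.len_eq, hlen] at hi
      omega
    rcases Bool.or_eq_true _ _ |>.mp hf with hf' | hf''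
    · rcases Bool.or_eq_true _ _ |>.mp hf' with h | h
      · exact ⟨"@mock_justified", by simp [pvMarkers], i.toNat, hwin, by
          simpa [String.toList_ofList] using (PySem.Str.isIn_iff_infix _ _).mp h⟩
      · exact ⟨"# Mock justified", by simp [pvMarkers], i.toNat, hwin, by
          simpa [String.toList_ofList] using (PySem.Str.isIn_iff_infix _ _).mp h⟩
    · exact ⟨"# Justified:", by simp [pvMarkers], i.toNat, hwin, by
        simpa [String.toList_ofList] using (PySem.Str.isIn_iff_infix _ _).mp hf''⟩
  · rintro ⟨m, hm, j, hwin, hocc⟩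
    have hne := (pv_markers_ok m hm).2
    have hjlen : j < (pvSplit '\n' content.toList).length := by
      by_contra hge
      rw [List.getD_eq_default _ _ (le_of_not_gt hge)] at hocc
      exact hne (List.infix_nil.mp hocc)
    refine ⟨(j : Int), ?_, ?_⟩
    · rw [PySem.List.mem_pyRange_one]
      rw [PySem.List.len_eq, hlen]
      constructor
      · exact max_le (Int.natCast_nonneg j) (by omega)
      · exact lt_min (by exact_mod_cast hjlen) hwin.2
    · have hlt : (j : Int) < PySem.List.len ((pvSplit '\n' content.toList).map String.ofList) := by
        rw [PySem.List.len_eq, hlen]; exact_mod_cast hjlen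
      rw [if_pos hlt, PySem.List.pyGetD_natCast]
      have hgd : (String.ofList ([] : List Char)) = "" := rfl
      rw [← hgd, List.getD_map _ _ String.ofList]
      have : m = "@mock_justified" ∨ m = "# Mock justified" ∨ m = "# Justified:" := by
        simpa [pvMarkers] using hm
      simp only [Bool.or_eq_true]
      rcases this with rfl | rfl | rfl
      · exact Or.inl (Or.inl (by
          rw [PySem.Str.isIn_iff_infix]; simpa [String.toList_ofList] using hocc))
      · exact Or.inl (Or.inr (by
          rw [PySem.Str.isIn_iff_infix]; simpa [String.toList_ofList] using hocc))
      · exact Or.inr (by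
          rw [PySem.Str.isIn_iff_infix]; simpa [String.toList_ofList] using hocc)

-- ===== VERDICT (by name: the statement is the Claim_ definition above) =====
theorem find_mock_justification_spec : Claim_equal_find_mock_justification := by
  intro content line_no _
  show find_mock_justification content line_no = find_mock_justification_alt content line_no
  rw [Bool.eq_iff_iff, pvA_iff, find_mock_justification_alt, pvSweep_iff]
  constructor
  · rintro ⟨m, hm, i, hw, hocc⟩
    obtain ⟨hnl, hne⟩ := pv_markers_ok m hm
    rcases (pv_occ_iff hne hnl content.toList
        (fun i => line_no - 5 ≤ (i : Int) ∧ (i : Int) < line_no + 2)).mpr ⟨i, hocc, hw⟩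
      with ⟨p, hpre, hp⟩
    exact ⟨p, by simpa using hp, m, hm, hpre⟩
  · rintro ⟨p, hp, m, hm, hpre⟩
    obtain ⟨hnl, hne⟩ := pv_markers_ok m hm
    rcases (pv_occ_iff hne hnl content.toList
        (fun i => line_no - 5 ≤ (i : Int) ∧ (i : Int) < line_no + 2)).mp
        ⟨p, hpre, by simpa using hp⟩
      with ⟨i, hocc, hw⟩
    exact ⟨m, hm, i, hw, hocc⟩
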